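-- pv_equiv track=rewrite | github.com/rutasoptimizacion/sorhd | backend/scripts/assign_ruts.py | format_rut
-- ===== SOURCE A (Python) =====
-- def format_rut(rut_number: int, verifier: str) -> str:
--     """
--     Formatea un RUT en el formato estándar 12.345.678-9
--
--     Args:
--         rut_number: Número del RUT
--         verifier: Dígito verificador
--
--     Returns:
--         RUT formateado con puntos y guión
--     """
--     rut_str = str(rut_number)
--     # Add dots for thousands separator
--     formatted = ''
--     for i, digit in enumerate(reversed(rut_str)):
--         if i > 0 and i % 3 == 0:
--             formatted = '.' + formatted
--         formatted = digit + formatted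
--
--     return f"{formatted}-{verifier}"
-- ===== SOURCE B (Python) =====
-- def _groups(s):
--     if len(s) > 3:
--         return _groups(s[:-3]) + [s[-3:]]
--     return [s]
--
--
-- def format_rut(rut_number: int, verifier: str) -> str:
--     groups = _groups(str(rut_number))
--     return '.'.join(groups) + '-' + verifier
-- ===== Notes on version B (the rewrite author's own statement) =====
-- stated objective: idiomatic
-- what changed: B splits the decimal string into chunks of three from the right (recursively) and joins them with dots, instead of A's per-character loop over the reversed string with an index-mod-3 test.
import Mathlib
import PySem

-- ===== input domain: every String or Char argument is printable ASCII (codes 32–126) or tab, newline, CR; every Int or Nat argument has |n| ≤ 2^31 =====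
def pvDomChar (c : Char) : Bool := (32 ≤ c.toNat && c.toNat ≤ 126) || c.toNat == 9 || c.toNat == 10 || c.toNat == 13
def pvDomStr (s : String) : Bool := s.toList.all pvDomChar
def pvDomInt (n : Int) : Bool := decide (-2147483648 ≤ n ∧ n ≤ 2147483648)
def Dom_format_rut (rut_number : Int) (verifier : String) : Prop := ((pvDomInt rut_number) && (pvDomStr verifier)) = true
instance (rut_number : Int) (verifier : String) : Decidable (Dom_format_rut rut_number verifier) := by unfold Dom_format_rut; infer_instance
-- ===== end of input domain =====

-- B formats the RUT by splitting the decimal string into chunks of three from the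
-- right and joining them with dots, instead of A's per-character indexed loop
-- (objective: idiomatic; same cost).

-- ===== PORT A =====
-- the loop body: formatted = digit + ('.' + formatted if i>0 and i%3==0 else formatted)
def pvStepA (acc : List Char) (p : Int × Char) : List Char :=
  if p.1 > 0 ∧ PySem.Int.mod p.1 3 = 0 then p.2 :: '.' :: acc else p.2 :: acc

def format_rut (rut_number : Int) (verifier : String) : String :=
  let rutStr := PySem.Int.toChars rut_number
  let formatted := (PySem.List.enumerate rutStr.reverse).foldl pvStepA []
  String.ofList (formatted ++ '-' :: verifier.toList)

-- ===== PORT B =====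
-- _groups(s): recursively split off the last three characters while len(s) > 3
def pvGroups (l : List Char) : List (List Char) :=
  if _h : l.length > 3 then
    pvGroups (l.take (l.length - 3)) ++ [l.drop (l.length - 3)]
  else [l]
termination_by l.length
decreasing_by simp [List.length_take]; omega

def format_rut_alt (rut_number : Int) (verifier : String) : String :=
  String.ofList (PySem.Chars.join ['.'] (pvGroups (PySem.Int.toChars rut_number))
             ++ '-' :: verifier.toList)

-- ===== PRECONDITION & SPEC =====
def Spec_format_rut (rut_number : Int) (verifier : String) (out : String) : Prop := out = format_rut_alt rut_number verifier
instance (rut_number : Int) (verifier : String) (out : String) : Decidable (Spec_format_rut rut_number verifier out) := by unfold Spec_format_rut; infer_instance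

-- ===== CLAIM (what is proved, stated in full; the proofs are below) =====
def Claim_equal_format_rut : Prop := ∀ (rut_number : Int) (verifier : String), Dom_format_rut rut_number verifier → Spec_format_rut rut_number verifier (format_rut rut_number verifier)

-- ===== LEMMAS AND PROOFS =====

-- the accumulator is only ever prepended to
theorem pvStepA_prepend (acc : List Char) (p : Int × Char) :
    pvStepA acc p = pvStepA [] p ++ acc := by
  unfold pvStepA; split_ifs <;> simp

theorem pvFoldA_prepend (xs : List (Int × Char)) (acc : List Char) :
    xs.foldl pvStepA acc = xs.foldl pvStepA [] ++ acc := by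
  induction xs generalizing acc with
  | nil => simp
  | cons p xs ih =>
    simp only [List.foldl_cons]
    rw [ih, ih (pvStepA [] p), pvStepA_prepend, List.append_assoc]

-- shifting all indices by 3 does not change the fold, as long as they start ≥ 1
theorem pvFoldA_shift (xs : List Char) (s : Int) (hs : 1 ≤ s) :
    (PySem.List.enumerate xs (s + 3)).foldl pvStepA [] =
      (PySem.List.enumerate xs s).foldl pvStepA [] := by
  induction xs generalizing s with
  | nil => simp [PySem.List.enumerate_nil]
  | cons c xs ih =>
    simp only [PySem.List.enumerate_cons, List.foldl_cons]
    rw [pvFoldA_prepend, pvFoldA_prepend (PySem.List.enumerate xs (s + 1))]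
    have harith : s + 3 + 1 = (s + 1) + 3 := by ring
    rw [harith, ih (s + 1) (by omega)]
    congr 1
    unfold pvStepA
    have h3 : (0:Int) < 3 := by norm_num
    simp only [PySem.Int.mod_eq_emod_of_pos h3]
    have : (s + 3) % 3 = s % 3 := by omega
    have hgt : s > 0 := by omega
    have hgt3 : s + 3 > 0 := by omega
    simp [this, hgt, hgt3]

-- on a string of length ≤ 3 A's loop just reverses the reversed string
theorem pvFoldA_short (l : List Char) (h : l.length ≤ 3) :
    (PySem.List.enumerate l.reverse).foldl pvStepA [] = l := by
  match l, h with
  | [], _ => rfl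
  | [a], _ =>
      simp [PySem.List.enumerate, PySem.List.enumerate_cons, pvStepA]
  | [a, b], _ =>
      simp [PySem.List.enumerate, PySem.List.enumerate_cons, pvStepA, PySem.Int.mod]
  | [a, b, c], _ =>
      simp [PySem.List.enumerate, PySem.List.enumerate_cons, pvStepA, PySem.Int.mod]

-- pvGroups always produces a nonempty list of groups
theorem pvGroups_ne_nil (l : List Char) : pvGroups l ≠ [] := by
  unfold pvGroups
  split_ifs <;> simp

theorem pvJoin_append_singleton (gs : List (List Char)) (x : List Char) (h : gs ≠ []) :
    PySem.Chars.join ['.'] (gs ++ [x]) = PySem.Chars.join ['.'] gs ++ '.' :: x := by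
  induction gs with
  | nil => exact absurd rfl h
  | cons g gs ih =>
    cases gs with
    | nil =>
      rw [show ([g] ++ [x] : List (List Char)) = [g, x] from rfl,
          PySem.Chars.join_cons_cons, PySem.Chars.join_singleton, PySem.Chars.join_singleton]
      simp
    | cons g' gs' =>
      rw [show ((g :: g' :: gs') ++ [x] : List (List Char)) = g :: g' :: (gs' ++ [x]) from rfl,
          PySem.Chars.join_cons_cons,
          show (g' :: (gs' ++ [x]) : List (List Char)) = (g' :: gs') ++ [x] from rfl,
          ih (by simp), PySem.Chars.join_cons_cons]
      simp

-- main: A's loop equals B's join-of-groups, by strong induction on the length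
theorem pvMain : ∀ (n : Nat) (l : List Char), l.length ≤ n →
    (PySem.List.enumerate l.reverse).foldl pvStepA [] =
      PySem.Chars.join ['.'] (pvGroups l) := by
  intro n
  induction n with
  | zero =>
    intro l hl
    have : l = [] := by
      cases l with
      | nil => rfl
      | cons a l => simp at hl
    subst this
    simp [pvGroups, PySem.Chars.join_singleton, PySem.List.enumerate_nil]
  | succ n ih =>
    intro l hl
    by_cases hlen : l.length ≤ 3
    · rw [pvFoldA_short l hlen]
      unfold pvGroups
      rw [dif_neg (by omega), PySem.Chars.join_singleton]
    · -- length > 3: split l into front ++ last3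
      set front := l.take (l.length - 3) with hfront
      set last3 := l.drop (l.length - 3) with hlast3
      have hsplit : l = front ++ last3 := (List.take_append_drop _ l).symm
      have hflen : front.length = l.length - 3 := by
        rw [hfront, List.length_take]; omega
      have hllen : last3.length = 3 := by
        rw [hlast3, List.length_drop]; omega
      have hfne : front ≠ [] := by
        intro h; rw [h] at hflen; simp at hflen; omega
      -- left side
      have hrev : l.reverse = last3.reverse ++ front.reverse := by
        rw [hsplit, List.reverse_append]
      rw [hrev, PySem.List.enumerate_append, List.foldl_append]
      have h0 : (PySem.List.enumerate last3.reverse 0).foldl pvStepA [] = last3 := by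
        exact pvFoldA_short last3 (by omega)
      rw [h0]
      have hlen3 : (0:Int) + (last3.reverse.length : Int) = 3 := by
        simp [hllen]
      rw [hlen3]
      -- front.reverse is nonempty
      obtain ⟨c, m, hcm⟩ : ∃ c m, front.reverse = c :: m := by
        cases hfr : front.reverse with
        | nil => exact absurd (by simpa using hfr) hfne
        | cons c m => exact ⟨c, m, rfl⟩
      rw [hcm, PySem.List.enumerate_cons, List.foldl_cons]
      have hstep3 : pvStepA last3 (3, c) = c :: '.' :: last3 := by
        unfold pvStepA
        simp
      rw [hstep3, pvFoldA_prepend]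
      have hshift : (PySem.List.enumerate m (3 + 1)).foldl pvStepA [] =
          (PySem.List.enumerate m 1).foldl pvStepA [] := by
        have := pvFoldA_shift m 1 (by norm_num)
        have harith : (3:Int) + 1 = 1 + 3 := by norm_num
        rw [harith, this]
      rw [hshift]
      -- right side via IH on front
      have hihf : (PySem.List.enumerate front.reverse).foldl pvStepA [] =
          PySem.Chars.join ['.'] (pvGroups front) := by
        apply ih
        omega
      rw [hcm, PySem.List.enumerate_cons, List.foldl_cons] at hihf
      have hstep0 : pvStepA [] ((0:Int), c) = [c] := by
        unfold pvStepA; simp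
      rw [hstep0, pvFoldA_prepend] at hihf
      have hgl : pvGroups l = pvGroups front ++ [last3] := by
        rw [pvGroups]
        rw [dif_pos (by omega)]
      rw [hgl, pvJoin_append_singleton _ _ (pvGroups_ne_nil front), ← hihf]
      simp

-- ===== VERDICT (by name: the statement is the Claim_ definition above) =====
theorem format_rut_spec : Claim_equal_format_rut := by
  intro rut verifier _
  unfold Spec_format_rut format_rut format_rut_alt
  simp only
  rw [pvMain (PySem.Int.toChars rut).length (PySem.Int.toChars rut) le_rfl]
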